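-- pv_equiv track=rewrite | github.com/guidodinello/scripts | utils/string_fuzzy_matcher.py | find_most_similar_words
-- ===== SOURCE A (Python) =====
-- from collections.abc import Iterable
-- from typing import NamedTuple
--
-- class WordDistance(NamedTuple):
--     """Tuple containing a word and its distance to another word"""
--
--     word: str
--     distance: int
--
-- def find_most_similar_words(
--     obj_word: str,
--     word_list: Iterable[str],
--     num_results: int = 10,
-- ) -> list[WordDistance]:
--     """Finds the most similar words to the obj_word in the given word_list
--     Args:
--         obj_word (str): word to compare to
--         word_list (Iterable[str]): list of words to compare with
--         num_results (int, optional): number of results to retrieve.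
--             Defaults to 10.
--     Returns:
--         list[WordDistance]: list of WordDistance objects
--     """
--     distances = [
--         WordDistance(
--             word=word,
--             distance=damerau_levenshtein_distance(obj_word, word),
--         )
--         for word in word_list
--     ]
--     distances.sort(key=lambda x: x[1])
--     return distances[:num_results]
--
-- def damerau_levenshtein_distance(str1: str, str2: str) -> int:
--     """Damerau-Levenshtein distance
--     https://en.wikipedia.org/wiki/Damerau%E2%80%93Levenshtein_distance
--
--     d_a,b[i,j] = min(
--         d_a,b[i-1, j  ] + 1,       i>0 # Deletion
--         d_a,b[i  , j-1] + 1,       j>0 # Insertion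
--         d_a,b[i-1, j-1] + cost,    i,j>0 # Substitution
--         d_a,b[i-2, j-2] + cost,    i,j>1,
--             a[i] == b[j-1], a[i-1] == b[j] # Transposition
--     )
--     where
--         cost = 1 if a[i] != b[j] else 0
--     """
--     len_str1, len_str2 = len(str1), len(str2)
--
--     # Create a matrix of size (len_str1 + 1) x (len_str2 + 1)
--     distances = [[0] * (len_str2 + 1) for _ in range(len_str1 + 1)]
--
--     # Initialize the first row and first column of the matrix
--     for i in range(len_str1 + 1):
--         distances[i][0] = i
--     for j in range(len_str2 + 1):
--         distances[0][j] = j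
--
--     # Calculate the minimum number of operations required
--     for i in range(1, len_str1 + 1):
--         for j in range(1, len_str2 + 1):
--             cost = 0 if str1[i - 1] == str2[j - 1] else 1
--             distances[i][j] = min(
--                 distances[i - 1][j] + 1,  # Deletion
--                 distances[i][j - 1] + 1,  # Insertion
--                 distances[i - 1][j - 1] + cost,  # Substitution
--             )
--             if (
--                 i > 1
--                 and j > 1
--                 and str1[i - 1] == str2[j - 2]
--                 and str1[i - 2] == str2[j - 1]
--             ):
--                 distances[i][j] = min(
--                     distances[i][j],
--                     distances[i - 2][j - 2] + cost,
--                 )  # Transposition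
--
--     return distances[len_str1][len_str2]
-- ===== SOURCE B (Python) =====
-- from collections.abc import Iterable
-- from typing import NamedTuple
--
--
-- class WordDistance(NamedTuple):
--     """Tuple containing a word and its distance to another word"""
--
--     word: str
--     distance: int
--
--
-- def damerau_levenshtein_distance(str1: str, str2: str) -> int:
--     """OSA distance, computed TOP-DOWN: d(i, j) is the distance between the
--     prefixes str1[:i] and str2[:j], evaluated by memoized recursion (only the
--     states actually demanded from (len1, len2) are ever computed).
--
--     The recursion is executed through a small generator trampoline (an explicit
--     stack of suspended frames) purely to sidestep CPython's recursion limit on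
--     very long strings; each `yield (p, q)` is the recursive call d(p, q)."""
--     memo: dict[tuple[int, int], int] = {}
--
--     def d(i: int, j: int):
--         if j == 0:
--             return i
--         if i == 0:
--             return j
--         if (i, j) in memo:
--             return memo[(i, j)]
--         cost = 0 if str1[i - 1] == str2[j - 1] else 1
--         deletion = (yield (i - 1, j)) + 1
--         insertion = (yield (i, j - 1)) + 1
--         substitution = (yield (i - 1, j - 1)) + cost
--         best = min(deletion, insertion, substitution)
--         if i > 1 and j > 1 and str1[i - 1] == str2[j - 2] and str1[i - 2] == str2[j - 1]:
--             best = min(best, (yield (i - 2, j - 2)) + cost)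
--         memo[(i, j)] = best
--         return best
--
--     # trampoline: run d(len1, len2), expanding each yielded call on an explicit stack;
--     # base cases and memo hits are answered directly, without building a frame
--     stack = [d(len(str1), len(str2))]
--     value = None
--     while stack:
--         try:
--             call = stack[-1].send(value)
--             i, j = call
--             if j == 0:
--                 value = i
--             elif i == 0:
--                 value = j
--             elif call in memo:
--                 value = memo[call]
--             else:
--                 value = None
--                 stack.append(d(i, j))
--         except StopIteration as e:
--             stack.pop()
--             value = e.value
--     return value
--
--
-- def find_most_similar_words(
--     obj_word: str,
--     word_list: Iterable[str],
--     num_results: int = 10,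
-- ) -> list[WordDistance]:
--     distances = [
--         WordDistance(word=word, distance=damerau_levenshtein_distance(obj_word, word))
--         for word in word_list
--     ]
--     distances.sort(key=lambda x: x[1])
--     return distances[:num_results]
-- ===== Notes on version B (the rewrite author's own statement) =====
-- stated objective: alternative
-- what changed: damerau_levenshtein_distance is rewritten from A's bottom-up fill of a full (n1+1)x(n2+1) matrix (explicit init passes, nested index loops) into a top-down memoized recursion d(i,j) over prefix lengths with a dict memo, computing only the states demanded from (len1,len2); the recursion is driven by a generator trampoline (an explicit stack of suspended frames) solely to sidestep CPython's recursion limit on very long strings; the outer map/stable-sort/slice wrapper is unchanged.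
import Mathlib
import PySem

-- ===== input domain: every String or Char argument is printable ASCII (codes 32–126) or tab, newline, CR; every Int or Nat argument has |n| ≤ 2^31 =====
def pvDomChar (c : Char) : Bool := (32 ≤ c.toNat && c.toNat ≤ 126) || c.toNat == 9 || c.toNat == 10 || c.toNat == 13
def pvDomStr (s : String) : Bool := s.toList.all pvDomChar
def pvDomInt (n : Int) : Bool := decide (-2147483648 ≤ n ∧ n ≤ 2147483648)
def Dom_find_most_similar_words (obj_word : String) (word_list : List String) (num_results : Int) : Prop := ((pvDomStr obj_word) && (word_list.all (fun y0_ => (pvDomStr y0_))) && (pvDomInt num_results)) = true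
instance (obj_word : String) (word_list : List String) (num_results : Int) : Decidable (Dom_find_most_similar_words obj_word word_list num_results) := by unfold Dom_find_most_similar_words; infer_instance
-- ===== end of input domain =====

-- B replaces A's bottom-up full-matrix DP for the OSA distance by a top-down memoized
-- recursion over prefix lengths (dict memo, only demanded states computed); the outer
-- map/stable-sort/slice wrapper is unchanged. Objective: alternative decomposition.

-- ===== PORT A =====
-- distances[i][j] read / write (indices are always in range in A, so getD/set are exact)
def pvGet (m : List (List Int)) (i j : Nat) : Int := (m.getD i []).getD j 0
def pvSet (m : List (List Int)) (i j : Nat) (v : Int) : List (List Int) :=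
  m.set i ((m.getD i []).set j v)

-- literal port of A's damerau_levenshtein_distance; 'for i in range(1, n+1)' is ported as a
-- fold over List.range n with i = i' + 1 (the same index sequence)
def damerau_levenshtein_distance (str1 str2 : String) : Int :=
  let a := str1.toList
  let b := str2.toList
  let len1 := a.length
  let len2 := b.length
  let distances0 : List (List Int) := (List.range (len1 + 1)).map (fun _ => List.replicate (len2 + 1) (0 : Int))
  let distances1 := (List.range (len1 + 1)).foldl (fun m i => pvSet m i 0 (i : Int)) distances0
  let distances2 := (List.range (len2 + 1)).foldl (fun m j => pvSet m 0 j (j : Int)) distances1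
  let distances3 := (List.range len1).foldl (fun m i' =>
      let i := i' + 1
      (List.range len2).foldl (fun m j' =>
        let j := j' + 1
        let cost : Int := if a.getD (i - 1) ' ' = b.getD (j - 1) ' ' then 0 else 1
        let m := pvSet m i j (min (min (pvGet m (i - 1) j + 1) (pvGet m i (j - 1) + 1)) (pvGet m (i - 1) (j - 1) + cost))
        if 1 < i ∧ 1 < j ∧ a.getD (i - 1) ' ' = b.getD (j - 2) ' ' ∧ a.getD (i - 2) ' ' = b.getD (j - 1) ' ' then
          pvSet m i j (min (pvGet m i j) (pvGet m (i - 2) (j - 2) + cost))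
        else m) m) distances2
  pvGet distances3 len1 len2

def find_most_similar_words (obj_word : String) (word_list : List String) (num_results : Int) : List (String × Int) :=
  let distances := word_list.map (fun word => (word, damerau_levenshtein_distance obj_word word))
  let distances := PySem.List.sorted distances (fun x => x.2) false
  PySem.List.slice distances none (some num_results)

-- ===== PORT B =====
-- B's memoized recursion d(i, j) with its dict memo threaded through (state = (value, memo)).
-- Source B drives this very recursion through a generator trampoline (an explicit stack of
-- suspended frames) only to sidestep CPython's recursion limit; the trampoline answers
-- base-case / memo-hit calls directly with the same checks d itself makes. The recursion —
-- case order, sub-call order, guard, memo lookups and insertions — is ported one-for-one.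
-- Indices i, j are always in 0..len when str1/str2 is indexed, so getD is exact.
def dMemo (a b : List Char) : Nat → Nat → PySem.Dict (Nat × Nat) Int → Int × PySem.Dict (Nat × Nat) Int
  | i, 0, m => ((i : Int), m)
  | 0, j + 1, m => (((j + 1 : Nat) : Int), m)
  | i + 1, j + 1, m =>
    match m.get? (i + 1, j + 1) with
    | some v => (v, m)
    | none =>
      let cost : Int := if a.getD i ' ' = b.getD j ' ' then 0 else 1
      let r1 := dMemo a b i (j + 1) m
      let r2 := dMemo a b (i + 1) j r1.2
      let r3 := dMemo a b i j r2.2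
      let best := min (min (r1.1 + 1) (r2.1 + 1)) (r3.1 + cost)
      if 1 ≤ i ∧ 1 ≤ j ∧ a.getD i ' ' = b.getD (j - 1) ' ' ∧ a.getD (i - 1) ' ' = b.getD j ' ' then
        let r4 := dMemo a b (i - 1) (j - 1) r3.2
        let best := min best (r4.1 + cost)
        (best, r4.2.insert (i + 1, j + 1) best)
      else
        (best, r3.2.insert (i + 1, j + 1) best)
  termination_by i j _ => (i, j)

def damerau_levenshtein_distance_alt (str1 str2 : String) : Int :=
  let a := str1.toList
  let b := str2.toList
  (dMemo a b a.length b.length PySem.Dict.empty).1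

def find_most_similar_words_alt (obj_word : String) (word_list : List String) (num_results : Int) : List (String × Int) :=
  let distances := word_list.map (fun word => (word, damerau_levenshtein_distance_alt obj_word word))
  let distances := PySem.List.sorted distances (fun x => x.2) false
  PySem.List.slice distances none (some num_results)

-- ===== PRECONDITION & SPEC =====
def Spec_find_most_similar_words (obj_word : String) (word_list : List String) (num_results : Int) (out : List (String × Int)) : Prop := out = find_most_similar_words_alt obj_word word_list num_results
instance (obj_word : String) (word_list : List String) (num_results : Int) (out : List (String × Int)) : Decidable (Spec_find_most_similar_words obj_word word_list num_results out) := by unfold Spec_find_most_similar_words; infer_instance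

-- ===== CLAIM (what is proved, stated in full; the proofs are below) =====
def Claim_equal_find_most_similar_words : Prop := ∀ (obj_word : String) (word_list : List String) (num_results : Int), Dom_find_most_similar_words obj_word word_list num_results → Spec_find_most_similar_words obj_word word_list num_results (find_most_similar_words obj_word word_list num_results)

-- ===== LEMMAS AND PROOFS =====

-- the OSA recurrence, as a pure function of the prefix lengths
def osa (a b : List Char) : Nat → Nat → Int
  | 0, j => (j : Int)
  | i + 1, 0 => ((i + 1 : Nat) : Int)
  | i + 1, j + 1 =>
    let cost : Int := if a.getD i ' ' = b.getD j ' ' then 0 else 1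
    let v := min (min (osa a b i (j + 1) + 1) (osa a b (i + 1) j + 1)) (osa a b i j + cost)
    if 1 ≤ i ∧ 1 ≤ j ∧ a.getD i ' ' = b.getD (j - 1) ' ' ∧ a.getD (i - 1) ' ' = b.getD j ' ' then
      min v (osa a b (i - 1) (j - 1) + cost)
    else v
  termination_by i j => (i, j)

@[simp] lemma osa_zero_left (a b : List Char) (j : Nat) : osa a b 0 j = (j : Int) := by
  cases j <;> simp [osa]

@[simp] lemma osa_zero_right (a b : List Char) (i : Nat) : osa a b i 0 = (i : Int) := by
  cases i <;> simp [osa]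

-- matrices as a function of their indices
def pvMat (g : Nat → Nat → Int) (R C : Nat) : List (List Int) :=
  (List.range R).map (fun p => (List.range C).map (g p))

lemma pvGet_pvMat (g : Nat → Nat → Int) {R C i j : Nat} (hi : i < R) (hj : j < C) :
    pvGet (pvMat g R C) i j = g i j := by
  unfold pvGet pvMat
  rw [List.getD_eq_getElem (List.map _ (List.range R)) [] (by simpa using hi)]
  simp only [List.getElem_map, List.getElem_range]
  exact PySem.List.getD_map_range _ _ _ _ hj

lemma pvSet_pvMat (g : Nat → Nat → Int) {R C i j : Nat} (v : Int) (hi : i < R) (_hj : j < C) :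
    pvSet (pvMat g R C) i j v = pvMat (fun p q => if p = i ∧ q = j then v else g p q) R C := by
  unfold pvSet pvMat
  rw [List.getD_eq_getElem (List.map _ (List.range R)) [] (by simpa using hi)]
  apply List.ext_getElem (by simp)
  intro p h1 h2
  simp only [List.getElem_set, List.getElem_map, List.getElem_range]
  by_cases hp : i = p
  · subst hp
    rw [if_pos rfl]
    apply List.ext_getElem (by simp)
    intro q hq1 hq2
    simp only [List.getElem_set, List.getElem_map, List.getElem_range]
    by_cases hq : j = q
    · subst hq; simp
    · rw [if_neg hq, if_neg (by tauto)]
  · rw [if_neg hp]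
    apply List.ext_getElem (by simp)
    intro q hq1 hq2
    simp only [List.getElem_map, List.getElem_range]
    rw [if_neg (by tauto)]

lemma pvMat_congr {g g' : Nat → Nat → Int} {R C : Nat}
    (h : ∀ p, p < R → ∀ q, q < C → g p q = g' p q) : pvMat g R C = pvMat g' R C := by
  unfold pvMat
  apply List.ext_getElem (by simp)
  intro p h1 h2
  simp only [List.getElem_map, List.getElem_range]
  apply List.ext_getElem (by simp)
  intro q hq1 hq2
  simp only [List.getElem_map, List.getElem_range]
  exact h p (by simpa using h1) q (by simpa using hq1)

-- index-invariant descriptions of A's matrix during the fill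
def gIn (a b : List Char) (k t p q : Nat) : Int :=
  if p ≤ k ∨ q = 0 ∨ (p = k + 1 ∧ q ≤ t) then osa a b p q else 0

def gRow (a b : List Char) (k p q : Nat) : Int :=
  if p ≤ k ∨ q = 0 then osa a b p q else 0

lemma foldl_range_inv' {σ : Type} (f : σ → Nat → σ) (I : Nat → σ) (n : Nat) (X : σ)
    (hX : X = I 0) (h : ∀ k, k < n → f (I k) k = I (k + 1)) :
    (List.range n).foldl f X = I n := by
  subst hX
  induction n with
  | zero => simp
  | succ n ih =>
    rw [List.range_succ, List.foldl_append, ih (fun k hk => h k (by omega)), List.foldl_cons,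
      List.foldl_nil, h n (by omega)]

lemma gIn_left {a b : List Char} {k t p q : Nat} (h : p ≤ k) : gIn a b k t p q = osa a b p q := by
  unfold gIn; rw [if_pos (Or.inl h)]

lemma gIn_cur {a b : List Char} {k t q : Nat} (h : q ≤ t) : gIn a b k t (k + 1) q = osa a b (k + 1) q := by
  unfold gIn; rw [if_pos (Or.inr (Or.inr ⟨rfl, h⟩))]

lemma osa_succ (a b : List Char) (i j : Nat) :
    osa a b (i + 1) (j + 1) =
      if 1 ≤ i ∧ 1 ≤ j ∧ a.getD i ' ' = b.getD (j - 1) ' ' ∧ a.getD (i - 1) ' ' = b.getD j ' ' then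
        min (min (min (osa a b i (j + 1) + 1) (osa a b (i + 1) j + 1))
              (osa a b i j + if a.getD i ' ' = b.getD j ' ' then 0 else 1))
          (osa a b (i - 1) (j - 1) + if a.getD i ' ' = b.getD j ' ' then 0 else 1)
      else
        min (min (osa a b i (j + 1) + 1) (osa a b (i + 1) j + 1))
          (osa a b i j + if a.getD i ' ' = b.getD j ' ' then 0 else 1) := by
  rw [osa]

lemma dlA_eq (s1 s2 : String) :
    damerau_levenshtein_distance s1 s2 = osa s1.toList s2.toList s1.toList.length s2.toList.length := by
  simp only [damerau_levenshtein_distance]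
  generalize s1.toList = a
  generalize s2.toList = b
  rw [show (List.map (fun _ => List.replicate (b.length + 1) (0 : Int)) (List.range (a.length + 1)))
        = pvMat (fun _ _ => (0 : Int)) (a.length + 1) (b.length + 1) from by
      unfold pvMat; simp [List.map_const']]
  rw [foldl_range_inv' _
      (fun k => pvMat (fun p q => if q = 0 ∧ p < k then (p : Int) else 0) (a.length + 1) (b.length + 1))
      (a.length + 1) _ ?hX1 ?h1]
  case hX1 => exact pvMat_congr (by intro p hp q hq; rw [if_neg (by omega)])
  case h1 =>
    intro k hk
    rw [pvSet_pvMat _ _ hk (by omega)]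
    exact pvMat_congr (by intro p hp q hq; split_ifs <;> omega)
  rw [foldl_range_inv' _
      (fun k => pvMat (fun p q => if p = 0 ∧ q < k then (q : Int)
          else if q = 0 ∧ p < a.length + 1 then (p : Int) else 0) (a.length + 1) (b.length + 1))
      (b.length + 1) _ ?hX2 ?h2]
  case hX2 =>
    exact pvMat_congr (by
      intro p hp q hq
      rw [if_neg (show ¬(p = 0 ∧ q < 0) from by omega)])
  case h2 =>
    intro k hk
    rw [pvSet_pvMat _ _ (by omega) hk]
    exact pvMat_congr (by intro p hp q hq; split_ifs <;> omega)
  rw [show pvMat (fun p q => if p = 0 ∧ q < b.length + 1 then (q : Int)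
          else if q = 0 ∧ p < a.length + 1 then (p : Int) else 0) (a.length + 1) (b.length + 1)
        = pvMat (gRow a b 0) (a.length + 1) (b.length + 1) from pvMat_congr (by
      intro p hp q hq
      unfold gRow
      by_cases hp0 : p = 0
      · subst hp0; simp [hq]
      · by_cases hq0 : q = 0
        · subst hq0; simp [hp0, hp]
        · simp [hp0, hq0])]
  rw [foldl_range_inv' _ (fun t => pvMat (gRow a b t) (a.length + 1) (b.length + 1))
      a.length _ rfl ?hout]
  case hout =>
    intro t ht
    try dsimp only
    rw [show pvMat (gRow a b t) (a.length + 1) (b.length + 1)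
          = pvMat (gIn a b t 0) (a.length + 1) (b.length + 1) from pvMat_congr (by
        intro p hp q hq; unfold gRow gIn; split_ifs <;> first | rfl | (exfalso; omega))]
    rw [foldl_range_inv' _ (fun m => pvMat (gIn a b t m) (a.length + 1) (b.length + 1))
        b.length _ rfl ?hin]
    case hin =>
      intro m hm
      try dsimp only
      rw [show t + 1 - 1 = t from by omega, show m + 1 - 1 = m from by omega,
        show t + 1 - 2 = t - 1 from by omega, show m + 1 - 2 = m - 1 from by omega]
      rw [pvGet_pvMat (gIn a b t m) (i := t) (j := m + 1) (by omega) (by omega),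
        pvGet_pvMat (gIn a b t m) (i := t + 1) (j := m) (by omega) (by omega),
        pvGet_pvMat (gIn a b t m) (i := t) (j := m) (by omega) (by omega)]
      rw [gIn_left (le_refl t), gIn_cur (le_refl m), gIn_left (le_refl t)]
      rw [pvSet_pvMat _ _ (show t + 1 < a.length + 1 by omega) (show m + 1 < b.length + 1 by omega)]
      rw [pvGet_pvMat _ (i := t + 1) (j := m + 1) (by omega) (by omega),
        pvGet_pvMat _ (i := t - 1) (j := m - 1) (by omega) (by omega)]
      try dsimp only
      rw [if_pos (show t + 1 = t + 1 ∧ m + 1 = m + 1 from ⟨rfl, rfl⟩),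
        if_neg (show ¬(t - 1 = t + 1 ∧ m - 1 = m + 1) from by omega),
        gIn_left (show t - 1 ≤ t by omega)]
      rw [pvSet_pvMat _ _ (show t + 1 < a.length + 1 by omega) (show m + 1 < b.length + 1 by omega)]
      by_cases hg : 1 ≤ t ∧ 1 ≤ m ∧ a.getD t ' ' = b.getD (m - 1) ' ' ∧ a.getD (t - 1) ' ' = b.getD m ' '
      · rw [if_pos (show 1 < t + 1 ∧ 1 < m + 1 ∧ a.getD t ' ' = b.getD (m - 1) ' '
            ∧ a.getD (t - 1) ' ' = b.getD m ' ' from ⟨by omega, by omega, hg.2.2.1, hg.2.2.2⟩)]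
        apply pvMat_congr
        intro p hp q hq
        by_cases hpq : p = t + 1 ∧ q = m + 1
        · obtain ⟨h1, h2⟩ := hpq; subst h1; subst h2
          try dsimp only
          rw [if_pos (show t + 1 = t + 1 ∧ m + 1 = m + 1 from ⟨rfl, rfl⟩),
            gIn_cur (le_refl (m + 1)), osa_succ, if_pos hg]
        · try dsimp only
          rw [if_neg hpq]
          unfold gIn; split_ifs <;> first | rfl | (exfalso; omega)
      · rw [if_neg (fun hc => hg ⟨by omega, by omega, hc.2.2.1, hc.2.2.2⟩)]
        apply pvMat_congr
        intro p hp q hq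
        by_cases hpq : p = t + 1 ∧ q = m + 1
        · obtain ⟨h1, h2⟩ := hpq; subst h1; subst h2
          try dsimp only
          rw [if_pos (show t + 1 = t + 1 ∧ m + 1 = m + 1 from ⟨rfl, rfl⟩),
            gIn_cur (le_refl (m + 1)), osa_succ, if_neg hg]
        · try dsimp only
          rw [if_neg hpq]
          unfold gIn; split_ifs <;> first | rfl | (exfalso; omega)
    exact pvMat_congr (by intro p hp q hq; unfold gRow gIn; split_ifs <;> first | rfl | (exfalso; omega))
  rw [pvGet_pvMat _ (by omega) (by omega)]
  unfold gRow
  rw [if_pos (Or.inl (le_refl a.length))]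

-- a memo is correct when every stored value is the OSA distance of its key
def MemoOK (a b : List Char) (m : PySem.Dict (Nat × Nat) Int) : Prop :=
  ∀ p q v, m.get? (p, q) = some v → v = osa a b p q

-- the memoized recursion returns the OSA distance and keeps the memo correct
lemma dMemo_sound (a b : List Char) :
    ∀ i j (m : PySem.Dict (Nat × Nat) Int), MemoOK a b m →
      (dMemo a b i j m).1 = osa a b i j ∧ MemoOK a b (dMemo a b i j m).2 := by
  intro i j m
  induction i, j, m using dMemo.induct a b with
  | case1 i m =>
    intro hm
    refine ⟨?_, ?_⟩ <;> simp only [dMemo]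
    · rw [osa_zero_right]
    · exact hm
  | case2 j m =>
    intro hm
    refine ⟨?_, ?_⟩ <;> simp only [dMemo]
    · rw [osa_zero_left]
    · exact hm
  | case3 i j m v hv =>
    intro hm
    refine ⟨?_, ?_⟩ <;> simp only [dMemo, hv]
    · exact hm _ _ _ hv
    · exact hm
  | case4 i j m hv hlet1 hlet2 hlet3 hguard IH1 IH2a IH2b IH3a IH3b IH4 =>
    intro hm
    have H1 := IH1 hm
    have H2 := IH2b H1.2
    have H3 := IH3b H2.2
    have H4 : (dMemo a b (i - 1) (j - 1) (dMemo a b i j (dMemo a b (i + 1) j (dMemo a b i (j + 1) m).2).2).2).1 = osa a b (i - 1) (j - 1) ∧ MemoOK a b (dMemo a b (i - 1) (j - 1) (dMemo a b i j (dMemo a b (i + 1) j (dMemo a b i (j + 1) m).2).2).2).2 := IH4 H3.2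
    simp only [dMemo, hv]
    rw [if_pos hguard]
    constructor
    · simp only [H1.1, H2.1, H3.1, H4.1]
      rw [osa_succ, if_pos hguard]
    · intro p q v hget
      rw [PySem.Dict.get?_insert] at hget
      by_cases hpq : (p, q) = (i + 1, j + 1)
      · rw [if_pos hpq] at hget
        injection hget with hgv
        injection hpq with hp hq
        subst hp; subst hq
        rw [← hgv]
        simp only [H1.1, H2.1, H3.1, H4.1]
        rw [osa_succ, if_pos hguard]
      · rw [if_neg hpq] at hget
        exact H4.2 _ _ _ hget
  | case5 i j m hv hlet1 hlet2 hguard IH1 IH2a IH2b IH3 =>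
    intro hm
    have H1 := IH1 hm
    have H2 := IH2b H1.2
    have H3 : (dMemo a b i j (dMemo a b (i + 1) j (dMemo a b i (j + 1) m).2).2).1 = osa a b i j ∧ MemoOK a b (dMemo a b i j (dMemo a b (i + 1) j (dMemo a b i (j + 1) m).2).2).2 := IH3 H2.2
    simp only [dMemo, hv]
    rw [if_neg hguard]
    constructor
    · simp only [H1.1, H2.1, H3.1]
      rw [osa_succ, if_neg hguard]
    · intro p q v hget
      rw [PySem.Dict.get?_insert] at hget
      by_cases hpq : (p, q) = (i + 1, j + 1)
      · rw [if_pos hpq] at hget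
        injection hget with hgv
        injection hpq with hp hq
        subst hp; subst hq
        rw [← hgv]
        simp only [H1.1, H2.1, H3.1]
        rw [osa_succ, if_neg hguard]
      · rw [if_neg hpq] at hget
        exact H3.2 _ _ _ hget

lemma dlB_eq (s1 s2 : String) :
    damerau_levenshtein_distance_alt s1 s2 = osa s1.toList s2.toList s1.toList.length s2.toList.length := by
  simp only [damerau_levenshtein_distance_alt]
  exact (dMemo_sound s1.toList s2.toList _ _ _ (by
    intro p q v h
    rw [PySem.Dict.get?_empty] at h
    exact absurd h (by simp))).1

lemma dl_eq (s1 s2 : String) :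
    damerau_levenshtein_distance s1 s2 = damerau_levenshtein_distance_alt s1 s2 :=
  (dlA_eq s1 s2).trans (dlB_eq s1 s2).symm

-- ===== VERDICT (by name: the statement is the Claim_ definition above) =====
theorem find_most_similar_words_spec : Claim_equal_find_most_similar_words := by
  intro obj_word word_list num_results _
  unfold Spec_find_most_similar_words find_most_similar_words find_most_similar_words_alt
  simp only [dl_eq]
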